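-- pv_equiv track=rewrite | github.com/benbernard/RecordStream | src/snippets/python/recs_sdk.py | _parse_keyspec
-- ===== SOURCE A (Python) =====
-- def _parse_keyspec(spec: str) -> tuple[list[str], bool]:
--     """Parse a key spec string into component keys and fuzzy flag.
--
--     Args:
--         spec: The raw key specification.
--
--     Returns:
--         A tuple of (parsed_keys, is_fuzzy).
--     """
--     fuzzy = False
--     raw = spec
--
--     if raw.startswith("@"):
--         fuzzy = True
--         raw = raw[1:]
--
--     keys: list[str] = []
--     current: list[str] = []
--     last_char = ""
--
--     for ch in raw:
--         if ch == "/" and last_char != "\\":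
--             keys.append("".join(current))
--             current = []
--             last_char = ""
--             continue
--
--         if ch == "/" and last_char == "\\":
--             # Escaped slash – remove preceding backslash
--             current.pop()
--
--         current.append(ch)
--         last_char = ch
--
--     if current:
--         keys.append("".join(current))
--
--     return keys, fuzzy
-- ===== SOURCE B (Python) =====
-- def _parse_keyspec(spec: str) -> tuple[list[str], bool]:
--     """Parse a key spec string into component keys and fuzzy flag.
--
--     Split-then-merge pipeline: cut on every '/' at once, then re-join the
--     segments whose slash was escaped (segment ending in a backslash).
--     """
--     fuzzy = spec.startswith("@")
--     raw = spec[1:] if fuzzy else spec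
--
--     parts = raw.split("/")
--     keys: list[str] = []
--     acc = parts[0]
--     for p in parts[1:]:
--         if acc.endswith("\\"):
--             # the slash after acc was escaped: drop the backslash, keep the slash
--             acc = acc[:-1] + "/" + p
--         else:
--             keys.append(acc)
--             acc = p
--     if acc:
--         keys.append(acc)
--     return keys, fuzzy
-- ===== Notes on version B (the rewrite author's own statement) =====
-- stated objective: faster
-- what changed: Replaces the per-character state machine (current buffer, last_char flag, pop on escaped slash) with a split-then-merge pipeline: cut the string on every slash with str.split, then fold over the segments, re-joining any segment that ends in a backslash (its slash was escaped).
import Mathlib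
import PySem

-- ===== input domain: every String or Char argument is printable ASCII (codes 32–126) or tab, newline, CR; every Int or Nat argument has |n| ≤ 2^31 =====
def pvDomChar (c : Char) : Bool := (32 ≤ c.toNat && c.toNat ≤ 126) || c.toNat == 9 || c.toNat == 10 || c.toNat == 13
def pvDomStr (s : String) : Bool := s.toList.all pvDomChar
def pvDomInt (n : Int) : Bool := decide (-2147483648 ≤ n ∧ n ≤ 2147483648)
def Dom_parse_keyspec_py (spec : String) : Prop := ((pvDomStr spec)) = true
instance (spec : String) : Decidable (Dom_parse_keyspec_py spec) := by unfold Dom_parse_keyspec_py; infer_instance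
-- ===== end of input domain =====

-- B replaces A's per-character state machine with a split-on-slash then merge-escaped-segments fold (measurably faster: str.split does the scan at C speed).

-- ===== PORT A =====
-- A's loop body; state = (keys, current, last_char).  current : List Char ("".join(current) = String.ofList current);
-- current.pop() is ported as dropLast (Python pops the last element; it is only reached with last_char = "\\", hence current nonempty).
def pvStepA (st : List String × List Char × String) (ch : Char) : List String × List Char × String :=
  let keys := st.1; let current := st.2.1; let last := st.2.2
  if ch = '/' ∧ last ≠ "\\" then
    (keys ++ [String.ofList current], [], "")
  else
    let current := if ch = '/' ∧ last = "\\" then current.dropLast else current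
    (keys, current ++ [ch], String.ofList [ch])

def parse_keyspec_py (spec : String) : List String × Bool :=
  let fuzzy := PySem.Str.startswith spec "@"
  let raw := if fuzzy then PySem.List.slice spec.toList (some 1) none else spec.toList
  let fin := raw.foldl pvStepA ([], [], "")
  (if fin.2.1 ≠ [] then fin.1 ++ [String.ofList fin.2.1] else fin.1, fuzzy)

-- ===== PORT B =====
-- Source B's loop body; state = (keys, acc).
def pvStepB (st : List String × List Char) (p : List Char) : List String × List Char :=
  if PySem.Chars.endswith st.2 ['\\'] then
    (st.1, st.2.dropLast ++ '/' :: p)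
  else
    (st.1 ++ [String.ofList st.2], p)

def parse_keyspec_py_alt (spec : String) : List String × Bool :=
  let fuzzy := PySem.Str.startswith spec "@"
  let raw := if fuzzy then PySem.List.slice spec.toList (some 1) none else spec.toList
  match PySem.Chars.splitOn raw ['/'] with
  | [] => ([], fuzzy)          -- unreachable: str.split never returns an empty list
  | p0 :: ps =>
    let fin := ps.foldl pvStepB ([], p0)
    (if fin.2 ≠ [] then fin.1 ++ [String.ofList fin.2] else fin.1, fuzzy)

-- ===== PRECONDITION & SPEC =====
def Spec_parse_keyspec_py (spec : String) (out : List String × Bool) : Prop := out = parse_keyspec_py_alt spec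
instance (spec : String) (out : List String × Bool) : Decidable (Spec_parse_keyspec_py spec out) := by unfold Spec_parse_keyspec_py; infer_instance

-- ===== CLAIM (what is proved, stated in full; the proofs are below) =====
def Claim_equal_parse_keyspec_py : Prop := ∀ (spec : String), Dom_parse_keyspec_py spec → Spec_parse_keyspec_py spec (parse_keyspec_py spec)

-- ===== LEMMAS AND PROOFS =====

-- Canonical recursion both ports are reduced to: the keys produced from the remaining input, given the pending segment `cur`.
-- ===== LEMMAS AND PROOFS =====

-- Canonical recursion both ports are reduced to: the keys produced from the remaining input, given the pending segment `cur`.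
def pvF (cur : List Char) : List Char → List String
  | '\\' :: '/' :: cs => pvF (cur ++ ['/']) cs
  | '/' :: cs => String.ofList cur :: pvF [] cs
  | c :: cs => pvF (cur ++ [c]) cs
  | [] => if cur ≠ [] then [String.ofList cur] else []

theorem pvF_cons_default (cur cs : List Char) (c : Char)
    (h1 : ∀ (cs_1 : List Char), c = '\\' → cs = '/' :: cs_1 → False) (h2 : ¬ c = '/') :
    pvF cur (c :: cs) = pvF (cur ++ [c]) cs := by
  rw [pvF.eq_def]
  split
  · rename_i heq; injection heq with hA hB; exact (h1 _ hA hB).elim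
  · rename_i heq; injection heq with hA hB; exact absurd hA h2
  · rename_i heq; injection heq with hA hB; subst hA; subst hB; rfl
  · rename_i heq; simp at heq

-- Reference shape of str.split('/').
def pvSplit (cur : List Char) : List Char → List (List Char)
  | [] => [cur]
  | c :: cs => if c = '/' then cur :: pvSplit [] cs else pvSplit (cur ++ [c]) cs

theorem pvSplit_ne_nil (cs cur : List Char) : pvSplit cur cs ≠ [] := by
  induction cs generalizing cur with
  | nil => simp [pvSplit]
  | cons c cs ih => simp only [pvSplit]; split <;> simp [ih]

theorem pvSplit_prepend (cs a b : List Char) :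
    pvSplit (a ++ b) cs = (a ++ (pvSplit b cs).headI) :: (pvSplit b cs).tail := by
  induction cs generalizing b with
  | nil => simp [pvSplit]
  | cons c cs ih =>
    simp only [pvSplit]
    split
    · simp
    · rw [show (a ++ b) ++ [c] = a ++ (b ++ [c]) by simp, ih]

theorem pvSplit_cons_ne (cs : List Char) (c : Char) (h0 : List Char) (t0 : List (List Char))
    (hc : ¬ c = '/') (hps : pvSplit [] cs = h0 :: t0) :
    pvSplit [] (c :: cs) = (c :: h0) :: t0 := by
  simp only [pvSplit]
  rw [if_neg hc]
  have := pvSplit_prepend cs [c] []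
  simp only [List.append_nil, hps] at this
  simpa using this

theorem pv_go_spec (fuel : Nat) : ∀ (cs cur : List Char) (acc : List (List Char)),
    cs.length < fuel →
    PySem.Chars.splitOn.go ['/'] fuel cs cur acc = acc.reverse ++ pvSplit cur.reverse cs := by
  induction fuel with
  | zero => intro cs cur acc h; omega
  | succ fuel ih =>
    intro cs cur acc h
    cases cs with
    | nil => simp [PySem.Chars.splitOn.go, pvSplit]
    | cons c cs =>
      by_cases hc : c = '/'
      · subst hc
        rw [show PySem.Chars.splitOn.go ['/'] (fuel + 1) ('/' :: cs) cur acc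
              = PySem.Chars.splitOn.go ['/'] fuel cs [] (cur.reverse :: acc) by
            simp [PySem.Chars.splitOn.go, List.isPrefixOf]]
        rw [ih cs [] (cur.reverse :: acc) (by simpa using Nat.lt_of_succ_lt_succ h)]
        simp [pvSplit]
      · rw [show PySem.Chars.splitOn.go ['/'] (fuel + 1) (c :: cs) cur acc
              = PySem.Chars.splitOn.go ['/'] fuel cs (c :: cur) acc by
            simp only [PySem.Chars.splitOn.go, List.isPrefixOf, Bool.and_eq_true, beq_iff_eq]
            rw [if_neg (by simp [hc, eq_comm])]]
        rw [ih cs (c :: cur) acc (by simpa using Nat.lt_of_succ_lt_succ h)]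
        simp [pvSplit, hc]

theorem pv_splitOn_eq (cs : List Char) : PySem.Chars.splitOn cs ['/'] = pvSplit [] cs := by
  rw [show PySem.Chars.splitOn cs ['/'] = PySem.Chars.splitOn.go ['/'] (cs.length + 1) cs [] [] from rfl]
  simpa using pv_go_spec (cs.length + 1) cs [] [] (by omega)

theorem pv_endsBS (xs : List Char) :
    PySem.Chars.endswith xs ['\\'] = decide (xs.getLast? = some '\\') := by
  show ['\\'].isSuffixOf xs = _
  rcases xs.eq_nil_or_concat with h | ⟨ys, c, h⟩ <;> subst h
  · decide
  · rw [List.concat_eq_append, List.getLast?_concat]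
    by_cases h : c = '\\'
    · simp [List.isSuffixOf, List.isPrefixOf, h]
    · have h2 : decide (some c = some '\\') = false := by simp [h]
      rw [h2]
      simp [List.isSuffixOf, List.isPrefixOf]
      exact fun hh => h (Eq.symm hh)

theorem pv_ofList_singleton_eq (c : Char) : String.ofList [c] = "\\" ↔ c = '\\' := by
  constructor
  · intro h
    have h2 : ([c] : List Char) = ['\\'] := by simpa using congrArg String.toList h
    simpa using h2
  · intro h; subst h; rfl

-- B's loop, in structurally-recursive form.
def pvFoldB (acc : List Char) : List (List Char) → List String
  | [] => if acc ≠ [] then [String.ofList acc] else []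
  | p :: ps =>
    if PySem.Chars.endswith acc ['\\'] then pvFoldB (acc.dropLast ++ '/' :: p) ps
    else String.ofList acc :: pvFoldB p ps

theorem pv_foldl_stepB (ps : List (List Char)) : ∀ (keys : List String) (acc : List Char),
    (if (ps.foldl pvStepB (keys, acc)).2 ≠ [] then
        (ps.foldl pvStepB (keys, acc)).1 ++ [String.ofList (ps.foldl pvStepB (keys, acc)).2]
      else (ps.foldl pvStepB (keys, acc)).1)
      = keys ++ pvFoldB acc ps := by
  induction ps with
  | nil => intro keys acc; by_cases h : acc = [] <;> simp [pvFoldB, h]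
  | cons p ps ih =>
    intro keys acc
    simp only [List.foldl_cons, pvFoldB, pvStepB]
    by_cases h : PySem.Chars.endswith acc ['\\'] = true
    · simp only [h, if_true, ih]
    · simp only [h, ih]
      simp only [Bool.not_eq_true] at h
      simp [h]

theorem pv_B_eq_F (cur cs : List Char)
    (H : cur.getLast? = some '\\' → cs.head? ≠ some '/') :
    pvFoldB (cur ++ (pvSplit [] cs).headI) (pvSplit [] cs).tail = pvF cur cs := by
  induction cur, cs using pvF.induct with
  | case1 cur cs ih =>
    rcases hps : pvSplit [] cs with _ | ⟨h0, t0⟩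
    · exact absurd hps (pvSplit_ne_nil cs [])
    rw [hps] at ih
    simp only [List.headI, List.tail_cons] at ih
    have hsplit : pvSplit [] ('\\' :: '/' :: cs) = ['\\'] :: h0 :: t0 := by
      simp [pvSplit, hps]
    rw [hsplit]
    simp only [List.headI, List.tail_cons]
    simp only [pvFoldB]
    rw [pv_endsBS (cur ++ ['\\'])]
    simp only [List.getLast?_concat, Option.some.injEq, decide_eq_true_eq, if_pos rfl]
    rw [List.dropLast_concat]
    rw [show pvF cur ('\\' :: '/' :: cs) = pvF (cur ++ ['/']) cs by simp [pvF]]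
    have := ih (by simp)
    rw [← this]
    simp
  | case2 cur cs ih =>
    rcases hps : pvSplit [] cs with _ | ⟨h0, t0⟩
    · exact absurd hps (pvSplit_ne_nil cs [])
    rw [hps] at ih
    simp only [List.headI, List.tail_cons, List.nil_append] at ih
    have hne : cur.getLast? ≠ some '\\' := fun h => H h rfl
    have hsplit : pvSplit [] ('/' :: cs) = [] :: h0 :: t0 := by
      simp [pvSplit, hps]
    rw [hsplit]
    simp only [List.headI, List.tail_cons, List.append_nil]
    simp only [pvFoldB]
    rw [pv_endsBS cur, decide_eq_false hne]
    simp only [Bool.false_eq_true, if_false]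
    rw [show pvF cur ('/' :: cs) = String.ofList cur :: pvF [] cs by simp [pvF]]
    rw [ih (by simp)]
  | case3 cur c cs h1 h2 ih =>
    rcases hps : pvSplit [] cs with _ | ⟨h0, t0⟩
    · exact absurd hps (pvSplit_ne_nil cs [])
    rw [hps] at ih
    simp only [List.headI, List.tail_cons] at ih
    rw [pvSplit_cons_ne cs c h0 t0 h2 hps]
    simp only [List.headI, List.tail_cons]
    rw [pvF_cons_default cur cs c h1 h2]
    have H' : (cur ++ [c]).getLast? = some '\\' → cs.head? ≠ some '/' := by
      intro hlast hhead
      simp only [List.getLast?_concat, Option.some_inj] at hlast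
      subst hlast
      cases cs with
      | nil => simp at hhead
      | cons d ds =>
        simp only [List.head?_cons, Option.some_inj] at hhead
        exact h1 ds rfl (by rw [hhead])
    rw [← ih H']
    simp
  | case4 cur hcur => simp [pvSplit, pvFoldB, pvF, hcur]
  | case5 cur hcur => simp [pvSplit, pvFoldB, pvF, hcur]

theorem pv_A_eq_F (cur cs : List Char)
    (H : cur.getLast? = some '\\' → cs.head? ≠ some '/') :
    ∀ (keys : List String) (last : String),
    (last = "\\" ↔ cur.getLast? = some '\\') →
    (if (cs.foldl pvStepA (keys, cur, last)).2.1 ≠ [] then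
        (cs.foldl pvStepA (keys, cur, last)).1 ++ [String.ofList (cs.foldl pvStepA (keys, cur, last)).2.1]
      else (cs.foldl pvStepA (keys, cur, last)).1)
      = keys ++ pvF cur cs := by
  induction cur, cs using pvF.induct with
  | case1 cur cs ih =>
    intro keys last hinv
    rw [show ('\\' :: '/' :: cs).foldl pvStepA (keys, cur, last)
          = cs.foldl pvStepA (pvStepA (pvStepA (keys, cur, last) '\\') '/') by simp]
    rw [show pvStepA (keys, cur, last) '\\' = (keys, cur ++ ['\\'], String.ofList ['\\']) by
          simp [pvStepA]]
    have hb : String.ofList ['\\'] = "\\" := rfl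
    rw [show pvStepA (keys, cur ++ ['\\'], String.ofList ['\\']) '/'
          = (keys, (cur ++ ['\\']).dropLast ++ ['/'], String.ofList ['/']) by
          simp [pvStepA, hb]]
    rw [List.dropLast_concat]
    rw [show pvF cur ('\\' :: '/' :: cs) = pvF (cur ++ ['/']) cs by simp [pvF]]
    apply ih (by simp) keys (String.ofList ['/'])
    rw [pv_ofList_singleton_eq]
    simp
  | case2 cur cs ih =>
    intro keys last hinv
    have hne : last ≠ "\\" := fun h => H (hinv.mp h) rfl
    rw [show ('/' :: cs).foldl pvStepA (keys, cur, last)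
          = cs.foldl pvStepA (pvStepA (keys, cur, last) '/') by simp]
    rw [show pvStepA (keys, cur, last) '/' = (keys ++ [String.ofList cur], [], "") by
          simp [pvStepA, hne]]
    rw [show pvF cur ('/' :: cs) = String.ofList cur :: pvF [] cs by simp [pvF]]
    rw [ih (by simp) (keys ++ [String.ofList cur]) "" (by simp)]
    simp
  | case3 cur c cs h1 h2 ih =>
    intro keys last hinv
    rw [show (c :: cs).foldl pvStepA (keys, cur, last)
          = cs.foldl pvStepA (pvStepA (keys, cur, last) c) by simp]
    rw [show pvStepA (keys, cur, last) c = (keys, cur ++ [c], String.ofList [c]) by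
          simp only [pvStepA]
          rw [if_neg (fun hand => h2 hand.1), if_neg (fun hand => h2 hand.1)]]
    rw [pvF_cons_default cur cs c h1 h2]
    apply ih ?_ keys (String.ofList [c]) ?_
    · intro hlast hhead
      simp only [List.getLast?_concat, Option.some_inj] at hlast
      subst hlast
      cases cs with
      | nil => simp at hhead
      | cons d ds =>
        simp only [List.head?_cons, Option.some_inj] at hhead
        exact h1 ds rfl (by rw [hhead])
    · rw [pv_ofList_singleton_eq]
      simp [List.getLast?_concat]
  | case4 cur hcur => intro keys last hinv; simp [pvF, hcur]
  | case5 cur hcur => intro keys last hinv; simp [pvF, hcur]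

-- ===== VERDICT (by name: the statement is the Claim_ definition above) =====
theorem parse_keyspec_py_spec : Claim_equal_parse_keyspec_py := by
  intro spec _
  unfold Spec_parse_keyspec_py parse_keyspec_py parse_keyspec_py_alt
  dsimp only []
  set raw := if PySem.Str.startswith spec "@" then PySem.List.slice spec.toList (some 1) none
             else spec.toList with hraw
  rcases hps : pvSplit [] raw with _ | ⟨h0, t0⟩
  · exact absurd hps (pvSplit_ne_nil raw [])
  rw [pv_splitOn_eq raw, hps]
  simp only []
  rw [pv_foldl_stepB t0 [] h0]
  have hB := pv_B_eq_F [] raw (by simp)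
  rw [hps] at hB
  simp only [List.headI, List.tail_cons, List.nil_append] at hB
  rw [hB]
  have hA := pv_A_eq_F [] raw (by simp) [] "" (by simp)
  simp only [List.nil_append] at hA ⊢
  rw [hA]
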